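-- pv_equiv track=rewrite | github.com/mxdmda6-cmyk/mxd-mda | src/task_board.py | emit_kanban
-- ===== SOURCE A (Python) =====
-- from collections import defaultdict
-- from typing import Dict, Iterable, List
--
-- def emit_kanban(rows: Iterable[Dict[str, str]]) -> str:
--     """Render rows grouped by their kanban lane as Markdown."""
--     grouped: Dict[str, List[Dict[str, str]]] = defaultdict(list)
--     for row in rows:
--         lane = row.get("kanban_lane") or "Backlog"
--         grouped[lane].append(row)
--
--     lines: List[str] = ["# Crow's Codex — Kanban Snapshot", ""]
--     for lane in sorted(grouped.keys(), key=_lane_sort_key):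
--         lines.append(f"## {lane}")
--         lines.append("")
--         for row in sorted(grouped[lane], key=lambda item: item.get("id", "")):
--             summary = (
--                 f"**{row.get('id', 'UNKNOWN')} — {row.get('title', '').strip()}** "
--                 f"(Owner: {row.get('owner', 'TBD')}, Priority: {row.get('priority', 'P?')}, "
--                 f"Status: {row.get('status', 'Unknown')}, Due: {row.get('due_date', 'TBD')})"
--             )
--             lines.append(f"- {summary}")
--             acceptance = row.get("acceptance_criteria", "").strip()
--             notes = row.get("notes", "").strip()
--             if acceptance:
--                 lines.append(f"  - Acceptance: {acceptance}")
--             if notes: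
--                 lines.append(f"  - Notes: {notes}")
--         lines.append("")
--     return "\n".join(lines).rstrip() + "\n"
--
-- def _lane_sort_key(lane: str) -> tuple:
--     """Provide a deterministic sort order for the kanban lanes."""
--     lane_order = {
--         "Backlog": 0,
--         "Sprint 0": 1,
--         "Sprint 1": 2,
--         "Sprint 2": 3,
--         "Sprint 3": 4,
--         "Done": 5,
--     }
--     return (lane_order.get(lane, 99), lane)
-- ===== SOURCE B (Python) =====
-- def emit_kanban(rows):
--     """Render rows grouped by their kanban lane as Markdown (single stable sort + one pass)."""
--     ordered = sorted(
--         rows,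
--         key=lambda row: (_lane_sort_key(row.get("kanban_lane") or "Backlog"), row.get("id", "")),
--     )
--     out = ["# Crow's Codex — Kanban Snapshot", ""]
--     current = None
--     for row in ordered:
--         lane = row.get("kanban_lane") or "Backlog"
--         if lane != current:
--             if current is not None:
--                 out.append("")
--             out.append(f"## {lane}")
--             out.append("")
--             current = lane
--         out.append(
--             f"- **{row.get('id', 'UNKNOWN')} — {row.get('title', '').strip()}** "
--             f"(Owner: {row.get('owner', 'TBD')}, Priority: {row.get('priority', 'P?')}, "
--             f"Status: {row.get('status', 'Unknown')}, Due: {row.get('due_date', 'TBD')})"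
--         )
--         acceptance = row.get("acceptance_criteria", "").strip()
--         if acceptance:
--             out.append(f"  - Acceptance: {acceptance}")
--         notes = row.get("notes", "").strip()
--         if notes:
--             out.append(f"  - Notes: {notes}")
--     if current is not None:
--         out.append("")
--     return "\n".join(out).rstrip() + "\n"
--
-- def _lane_sort_key(lane):
--     lane_order = {
--         "Backlog": 0,
--         "Sprint 0": 1,
--         "Sprint 1": 2,
--         "Sprint 2": 3,
--         "Sprint 3": 4,
--         "Done": 5,
--     }
--     return (lane_order.get(lane, 99), lane)
-- ===== Notes on version B (the rewrite author's own statement) =====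
-- stated objective: alternative
-- what changed: B replaces A's defaultdict grouping plus nested per-lane loops by ONE stable sort of all rows under the composite key (lane_sort_key(lane), id) followed by a single pass that emits a lane header whenever the tracked current lane changes.
import Mathlib
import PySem

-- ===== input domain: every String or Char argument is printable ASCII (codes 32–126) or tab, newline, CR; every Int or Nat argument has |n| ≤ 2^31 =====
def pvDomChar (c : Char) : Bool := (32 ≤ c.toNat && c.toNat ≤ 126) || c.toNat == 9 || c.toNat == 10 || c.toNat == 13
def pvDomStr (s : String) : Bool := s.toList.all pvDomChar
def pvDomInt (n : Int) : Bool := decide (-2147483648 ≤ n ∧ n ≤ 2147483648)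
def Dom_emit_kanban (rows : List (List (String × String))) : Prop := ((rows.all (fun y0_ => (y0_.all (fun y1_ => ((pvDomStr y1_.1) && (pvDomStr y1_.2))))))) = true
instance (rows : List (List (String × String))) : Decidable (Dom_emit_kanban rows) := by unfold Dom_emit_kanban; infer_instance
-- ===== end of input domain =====

-- B replaces A's defaultdict grouping + nested per-lane loops by one stable composite-key sort and a single
-- lane-tracking pass (objective: alternative; same asymptotic cost).

-- ===== PORT A =====
-- `_lane_sort_key(lane)`: the lane-order dict lookup, returning the (rank, lane) tuple (shared by A and B).
def lane_sort_key (lane : String) : Int × String :=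
  ((PySem.Dict.ofList [("Backlog", (0 : Int)), ("Sprint 0", 1), ("Sprint 1", 2),
      ("Sprint 2", 3), ("Sprint 3", 4), ("Done", 5)]).getD lane 99, lane)

-- `row.get("kanban_lane") or "Backlog"`: a missing key and "" are both falsy, so both give "Backlog".
def pvLane (row : List (String × String)) : String :=
  let v := (PySem.Dict.mk row).getD "kanban_lane" ""
  if v = "" then "Backlog" else v

-- tuple keys compare lexicographically in Python: encoded with Prod.Lex
def pvLaneKey (lane : String) : Int ×ₗ String := toLex (lane_sort_key lane)

def pvIdKey (row : List (String × String)) : String := (PySem.Dict.mk row).getD "id" ""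

-- the f-string `summary` of one row (identical code in A and B)
def pvSummary (row : List (String × String)) : String :=
  let d := PySem.Dict.mk row
  "**" ++ d.getD "id" "UNKNOWN" ++ " — " ++ PySem.Str.strip (d.getD "title" "") ++
    "** (Owner: " ++ d.getD "owner" "TBD" ++ ", Priority: " ++ d.getD "priority" "P?" ++
    ", Status: " ++ d.getD "status" "Unknown" ++ ", Due: " ++ d.getD "due_date" "TBD" ++ ")"

-- the per-row appends: "- summary", then the optional Acceptance and Notes sub-bullets (identical code in A and B)
def pvEmitRow (lines : List String) (row : List (String × String)) : List String :=
  let lines := lines ++ ["- " ++ pvSummary row]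
  let acceptance := PySem.Str.strip ((PySem.Dict.mk row).getD "acceptance_criteria" "")
  let lines := if acceptance ≠ "" then lines ++ ["  - Acceptance: " ++ acceptance] else lines
  let notes := PySem.Str.strip ((PySem.Dict.mk row).getD "notes" "")
  if notes ≠ "" then lines ++ ["  - Notes: " ++ notes] else lines

def emit_kanban (rows : List (List (String × String))) : String :=
  let grouped := rows.foldl (fun d row => d.modify (pvLane row) [] (fun g => g ++ [row]))
    (PySem.Dict.empty : PySem.Dict String (List (List (String × String))))
  let lines : List String := ["# Crow's Codex — Kanban Snapshot", ""]
  let lines := (PySem.List.sorted grouped.keys (fun l => pvLaneKey l)).foldl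
    (fun lines lane =>
      let lines := lines ++ ["## " ++ lane]
      let lines := lines ++ [""]
      let lines := (PySem.List.sorted (grouped.getD lane []) (fun item => pvIdKey item)).foldl
        (fun lines row => pvEmitRow lines row) lines
      lines ++ [""]) lines
  PySem.Str.rstrip (PySem.Str.join "\n" lines) ++ "\n"

-- ===== PORT B =====
-- composite sort key (lane_sort_key(lane), id) — a Python tuple, lexicographic
def pvRowKey (row : List (String × String)) : (Int ×ₗ String) ×ₗ String :=
  toLex (pvLaneKey (pvLane row), pvIdKey row)

-- loop body of B's single pass: emit headers when the lane changes, then the row's bullet lines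
def pvStep (st : List String × Option String) (row : List (String × String)) :
    List String × Option String :=
  let lane := pvLane row
  let st := if st.2 ≠ some lane then
      ((if st.2 = none then st.1 else st.1 ++ [""]) ++ ["## " ++ lane] ++ [""], some lane)
    else st
  (pvEmitRow st.1 row, st.2)

def emit_kanban_alt (rows : List (List (String × String))) : String :=
  let ordered := PySem.List.sorted rows (fun row => pvRowKey row)
  let st := ordered.foldl pvStep (["# Crow's Codex — Kanban Snapshot", ""], none)
  let out := if st.2 ≠ none then st.1 ++ [""] else st.1
  PySem.Str.rstrip (PySem.Str.join "\n" out) ++ "\n"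

-- ===== PRECONDITION & SPEC =====
def Spec_emit_kanban (rows : List (List (String × String))) (out : String) : Prop := out = emit_kanban_alt rows
instance (rows : List (List (String × String))) (out : String) : Decidable (Spec_emit_kanban rows out) := by unfold Spec_emit_kanban; infer_instance

-- ===== CLAIM (what is proved, stated in full; the proofs are below) =====
def Claim_equal_emit_kanban : Prop := ∀ (rows : List (List (String × String))), Dom_emit_kanban rows → Spec_emit_kanban rows (emit_kanban rows)

-- ===== LEMMAS AND PROOFS =====

-- the lines pvEmitRow appends, as a standalone list
def pvRowLines (row : List (String × String)) : List String :=
  ["- " ++ pvSummary row] ++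
    (if PySem.Str.strip ((PySem.Dict.mk row).getD "acceptance_criteria" "") ≠ "" then
      ["  - Acceptance: " ++ PySem.Str.strip ((PySem.Dict.mk row).getD "acceptance_criteria" "")] else []) ++
    (if PySem.Str.strip ((PySem.Dict.mk row).getD "notes" "") ≠ "" then
      ["  - Notes: " ++ PySem.Str.strip ((PySem.Dict.mk row).getD "notes" "")] else [])

theorem pvEmitRow_eq (lines : List String) (row : List (String × String)) :
    pvEmitRow lines row = lines ++ pvRowLines row := by
  unfold pvEmitRow pvRowLines
  by_cases h1 : PySem.Str.strip ((PySem.Dict.mk row).getD "acceptance_criteria" "") = "" <;>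
    by_cases h2 : PySem.Str.strip ((PySem.Dict.mk row).getD "notes" "") = "" <;>
      simp [h1, h2]

-- the distinct lanes, sorted by the lane key
def pvLanes (rows : List (List (String × String))) : List String :=
  PySem.List.sorted (PySem.Set.ofList (rows.map pvLane)) (fun l => pvLaneKey l)

-- the rows of one lane, sorted by id (stable)
def pvGrp (rows : List (List (String × String))) (L : String) : List (List (String × String)) :=
  PySem.List.sorted (rows.filter (fun r => pvLane r == L)) (fun item => pvIdKey item)

theorem pvLaneKey_inj : Function.Injective pvLaneKey := by
  intro a b h
  have := congrArg (fun p => (ofLex p).2) h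
  simpa [pvLaneKey, lane_sort_key] using this

theorem insertBy_append_not {α : Type} (before : α → α → Bool) (x : α) (as bs : List α)
    (h : ∀ y ∈ as, before x y = false) :
    PySem.List.insertBy before x (as ++ bs) = as ++ PySem.List.insertBy before x bs := by
  induction as with
  | nil => simp
  | cons a as ih =>
    have ha : before x a = false := h a (by simp)
    simp [PySem.List.insertBy, ha, ih (fun y hy => h y (by simp [hy]))]

theorem insertBy_append_yes {α : Type} (before : α → α → Bool) (x : α) (as bs : List α)
    (h : ∀ y ∈ bs, before x y = true) :
    PySem.List.insertBy before x (as ++ bs) = PySem.List.insertBy before x as ++ bs := by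
  induction as with
  | nil =>
    cases bs with
    | nil => simp [PySem.List.insertBy]
    | cons b bs => simp [PySem.List.insertBy, h b (by simp)]
  | cons a as ih =>
    by_cases ha : before x a = true
    · simp [PySem.List.insertBy, ha]
    · simp only [List.cons_append, PySem.List.insertBy, ha]
      simp [ih]

theorem insertBy_congr {α : Type} (before before' : α → α → Bool) (x : α) (l : List α)
    (h : ∀ y ∈ l, before x y = before' x y) :
    PySem.List.insertBy before x l = PySem.List.insertBy before' x l := by
  induction l with
  | nil => rfl
  | cons a l ih =>
    have ha := h a (by simp)
    by_cases hb : before x a = true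
    · simp [PySem.List.insertBy, hb, ha ▸ hb]
    · have hb' : before' x a = false := by rw [← ha]; simpa using hb
      simp [PySem.List.insertBy, hb, hb', ih (fun y hy => h y (by simp [hy]))]

theorem pvInsertBy_nil {α : Type} (before : α → α → Bool) (x : α) :
    PySem.List.insertBy before x [] = [x] := rfl

theorem pvInsertBy_cons {α : Type} (before : α → α → Bool) (x y : α) (ys : List α) :
    PySem.List.insertBy before x (y :: ys) =
      if before x y then x :: y :: ys else y :: PySem.List.insertBy before x ys := rfl

-- comparator abbreviations (exactly those PySem.List.sorted uses)
def pvBrk (a b : List (String × String)) : Bool := decide (pvRowKey a < pvRowKey b)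
def pvBid (a b : List (String × String)) : Bool := decide (pvIdKey a < pvIdKey b)
def pvBlk (a b : String) : Bool := decide (pvLaneKey a < pvLaneKey b)

theorem pvBrk_false_of_lane_lt {x y : List (String × String)}
    (h : pvLaneKey (pvLane y) < pvLaneKey (pvLane x)) : pvBrk x y = false := by
  simp only [pvBrk, decide_eq_false_iff_not, pvRowKey, Prod.Lex.toLex_lt_toLex]
  rintro (h1 | ⟨h1, h2⟩)
  · exact absurd h1 (not_lt_of_gt h)
  · exact absurd h1 (ne_of_gt h)

theorem pvBrk_true_of_lane_lt {x y : List (String × String)}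
    (h : pvLaneKey (pvLane x) < pvLaneKey (pvLane y)) : pvBrk x y = true := by
  simp only [pvBrk, decide_eq_true_eq, pvRowKey, Prod.Lex.toLex_lt_toLex]
  exact Or.inl h

theorem pvBrk_eq_pvBid_of_lane_eq {x y : List (String × String)}
    (h : pvLane x = pvLane y) : pvBrk x y = pvBid x y := by
  simp only [pvBrk, pvBid, pvRowKey, Prod.Lex.toLex_lt_toLex, h]
  by_cases hid : pvIdKey x < pvIdKey y <;> simp [hid]

-- inserting x into the lane-grouped concatenation when x's lane is already one of the (strictly
-- lane-key-increasing) lanes: the insertion happens inside x's own group, by id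
theorem insert_flatMap_mem (Ls : List String) (G : String → List (List (String × String)))
    (x : List (String × String))
    (hpw : Ls.Pairwise (fun a b => pvLaneKey a < pvLaneKey b))
    (hG : ∀ L ∈ Ls, ∀ y ∈ G L, pvLane y = L)
    (hmem : pvLane x ∈ Ls) :
    PySem.List.insertBy pvBrk x (Ls.flatMap G) =
      Ls.flatMap (fun L => if L = pvLane x then PySem.List.insertBy pvBid x (G L) else G L) := by
  induction Ls with
  | nil => cases hmem
  | cons L0 rest ih =>
    have hpw1 : ∀ b ∈ rest, pvLaneKey L0 < pvLaneKey b := (List.pairwise_cons.mp hpw).1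
    have hpw2 := (List.pairwise_cons.mp hpw).2
    by_cases hL : L0 = pvLane x
    · -- insert inside the head group
      have hrest : ∀ y ∈ rest.flatMap G, pvBrk x y = true := by
        intro y hy
        obtain ⟨L, hLmem, hyG⟩ := List.mem_flatMap.mp hy
        have hlane := hG L (by simp [hLmem]) y hyG
        exact pvBrk_true_of_lane_lt (by rw [hlane, ← hL]; exact hpw1 L hLmem)
      have hgrp : ∀ y ∈ G L0, pvBrk x y = pvBid x y := by
        intro y hy
        exact pvBrk_eq_pvBid_of_lane_eq (by rw [hG L0 (by simp) y hy, hL])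
      have hrestcongr : rest.flatMap
          (fun L => if L = pvLane x then PySem.List.insertBy pvBid x (G L) else G L) =
          rest.flatMap G := by
        apply List.flatMap_congr
        intro L hLr
        apply if_neg
        intro he
        have hlt := hpw1 L hLr
        rw [he, ← hL] at hlt
        exact lt_irrefl _ hlt
      rw [List.flatMap_cons, insertBy_append_yes _ _ _ _ hrest, insertBy_congr _ _ _ _ hgrp]
      conv_rhs => rw [List.flatMap_cons]
      rw [if_pos hL, hrestcongr]
    · have hmem' : pvLane x ∈ rest := by
        rcases List.mem_cons.mp hmem with h | h
        · exact absurd h.symm hL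
        · exact h
      have hhead : ∀ y ∈ G L0, pvBrk x y = false := by
        intro y hy
        apply pvBrk_false_of_lane_lt
        rw [hG L0 (by simp) y hy]
        exact hpw1 _ hmem'
      rw [List.flatMap_cons, insertBy_append_not _ _ _ _ hhead,
        ih hpw2 (fun L hL => hG L (by simp [hL])) hmem']
      conv_rhs => rw [List.flatMap_cons]
      rw [if_neg hL]

-- inserting x when its lane is new: x becomes a singleton group at the lane's sorted position
theorem insert_flatMap_notmem (Ls : List String) (G : String → List (List (String × String)))
    (x : List (String × String))
    (hpw : Ls.Pairwise (fun a b => pvLaneKey a < pvLaneKey b))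
    (hG : ∀ L ∈ Ls, ∀ y ∈ G L, pvLane y = L)
    (hmem : pvLane x ∉ Ls) :
    PySem.List.insertBy pvBrk x (Ls.flatMap G) =
      (PySem.List.insertBy pvBlk (pvLane x) Ls).flatMap
        (fun L => if L = pvLane x then [x] else G L) := by
  induction Ls with
  | nil => simp [PySem.List.insertBy]
  | cons L0 rest ih =>
    have hpw1 : ∀ b ∈ rest, pvLaneKey L0 < pvLaneKey b := (List.pairwise_cons.mp hpw).1
    have hpw2 := (List.pairwise_cons.mp hpw).2
    have hne0 : L0 ≠ pvLane x := fun h => hmem (by simp [h])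
    have hnem : pvLane x ∉ rest := fun h => hmem (by simp [h])
    rcases lt_trichotomy (pvLaneKey L0) (pvLaneKey (pvLane x)) with hlt | heq | hgt
    · have hhead : ∀ y ∈ G L0, pvBrk x y = false := by
        intro y hy
        apply pvBrk_false_of_lane_lt
        rw [hG L0 (by simp) y hy]; exact hlt
      have hblk : pvBlk (pvLane x) L0 = false := by
        simp only [pvBlk, decide_eq_false_iff_not]
        exact not_lt_of_gt hlt
      rw [List.flatMap_cons, insertBy_append_not _ _ _ _ hhead,
        ih hpw2 (fun L hL => hG L (by simp [hL])) hnem,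
        pvInsertBy_cons, if_neg (by simp [hblk])]
      simp only [List.flatMap_cons]
      rw [if_neg hne0]
    · exact absurd (pvLaneKey_inj heq) hne0
    · have hall : ∀ y ∈ (L0 :: rest).flatMap G, pvBrk x y = true := by
        intro y hy
        obtain ⟨L, hLmem, hyG⟩ := List.mem_flatMap.mp hy
        have hlane := hG L hLmem y hyG
        apply pvBrk_true_of_lane_lt
        rw [hlane]
        rcases List.mem_cons.mp hLmem with h | h
        · rw [h]; exact hgt
        · exact lt_trans hgt (hpw1 _ h)
      have hblk : pvBlk (pvLane x) L0 = true := by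
        simp only [pvBlk, decide_eq_true_eq]
        exact hgt
      have hcongr : (L0 :: rest).flatMap (fun L => if L = pvLane x then [x] else G L) =
          (L0 :: rest).flatMap G := by
        apply List.flatMap_congr
        intro L hLm
        rcases List.mem_cons.mp hLm with h | h
        · exact if_neg (h ▸ hne0)
        · exact if_neg (fun he => hnem (by rw [← he]; exact h))
      have hrhs : List.flatMap (fun L => if L = pvLane x then [x] else G L)
          (PySem.List.insertBy pvBlk (pvLane x) (L0 :: rest)) =
          x :: (L0 :: rest).flatMap G := by
        rw [pvInsertBy_cons, if_pos hblk, List.flatMap_cons, hcongr]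
        simp
      rw [hrhs]
      have h2 := insertBy_append_yes pvBrk x [] ((L0 :: rest).flatMap G) hall
      simpa [pvInsertBy_nil] using h2

theorem pvLanes_pairwise (rows : List (List (String × String))) :
    (pvLanes rows).Pairwise (fun a b => pvLaneKey a < pvLaneKey b) := by
  have hle := PySem.List.sorted_pairwise (PySem.Set.ofList (rows.map pvLane)) (fun l => pvLaneKey l)
  have hnd : (pvLanes rows).Nodup :=
    (PySem.List.sorted_perm (PySem.Set.ofList (rows.map pvLane)) (fun l => pvLaneKey l)
      false).symm.nodup (PySem.Set.nodup_ofList _)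
  have hnd' : (pvLanes rows).Pairwise (fun a b => a ≠ b) := hnd
  refine (hle.and hnd').imp ?_
  intro a b h
  exact lt_of_le_of_ne h.1 (fun he => h.2 (pvLaneKey_inj he))

theorem pvLanes_nodup (rows : List (List (String × String))) : (pvLanes rows).Nodup :=
  (PySem.List.sorted_perm (PySem.Set.ofList (rows.map pvLane)) (fun l => pvLaneKey l)
    false).symm.nodup (PySem.Set.nodup_ofList _)

theorem pvGrp_lane (rows : List (List (String × String))) (L : String) :
    ∀ y ∈ pvGrp rows L, pvLane y = L := by
  intro y hy
  have := (PySem.List.mem_sorted _ _ _ _).mp hy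
  have := List.of_mem_filter this
  simpa using this

theorem pvGrp_ne_nil (rows : List (List (String × String))) (L : String)
    (h : L ∈ pvLanes rows) : pvGrp rows L ≠ [] := by
  have hmem : L ∈ rows.map pvLane :=
    (PySem.Set.mem_ofList _ _).mp ((PySem.List.mem_sorted _ _ _ _).mp h)
  obtain ⟨r, hr, hrl⟩ := List.mem_map.mp hmem
  intro hnil
  have : rows.filter (fun r => pvLane r == L) = [] :=
    (PySem.List.sorted_eq_nil_iff _ _ _).mp hnil
  have : r ∉ rows.filter (fun r => pvLane r == L) := by rw [this]; simp
  exact this (List.mem_filter.mpr ⟨hr, by simp [hrl]⟩)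

-- one snoc step of B's sort equals one snoc step of the grouped decomposition
theorem pvSorted_decomp (rows : List (List (String × String))) :
    PySem.List.sorted rows (fun row => pvRowKey row) =
      (pvLanes rows).flatMap (fun L => pvGrp rows L) := by
  induction rows using List.reverseRecOn with
  | nil => simp [pvLanes, pvGrp, PySem.List.sorted, PySem.Set.ofList]
  | append_singleton p x ih =>
    have hpw := pvLanes_pairwise p
    have hG : ∀ L ∈ pvLanes p, ∀ y ∈ pvGrp p L, pvLane y = L := fun L _ => pvGrp_lane p L
    have hsnocL : PySem.List.sorted (p ++ [x]) (fun row => pvRowKey row) =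
        PySem.List.insertBy pvBrk x (PySem.List.sorted p (fun row => pvRowKey row)) := by
      rw [PySem.List.sorted_eq_foldl_insertBy, PySem.List.sorted_eq_foldl_insertBy,
        List.foldl_append]
      rfl
    have hofl : PySem.Set.ofList ((p ++ [x]).map pvLane) =
        PySem.Set.add (PySem.Set.ofList (p.map pvLane)) (pvLane x) := by
      simp [List.map_append, PySem.Set.ofList_eq_foldl]
    by_cases hmem : pvLane x ∈ pvLanes p
    · -- existing lane
      have hmemset : pvLane x ∈ PySem.Set.ofList (p.map pvLane) :=
        (PySem.List.mem_sorted _ _ _ _).mp hmem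
      have hlanes : pvLanes (p ++ [x]) = pvLanes p := by
        unfold pvLanes
        rw [hofl, PySem.Set.add_of_mem hmemset]
      rw [hsnocL, ih, insert_flatMap_mem _ _ _ hpw hG hmem, hlanes]
      apply List.flatMap_congr
      intro L hL
      have hfil : (p ++ [x]).filter (fun r => pvLane r == L) =
          p.filter (fun r => pvLane r == L) ++ (if pvLane x == L then [x] else []) := by
        simp only [List.filter_append, List.filter_singleton, Bool.cond_eq_ite]
      by_cases hLx : L = pvLane x
      · rw [if_pos hLx]
        unfold pvGrp
        rw [hfil, if_pos (by simp [hLx])]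
        rw [PySem.List.sorted_eq_foldl_insertBy, PySem.List.sorted_eq_foldl_insertBy,
          List.foldl_append]
        rfl
      · rw [if_neg hLx]
        unfold pvGrp
        rw [hfil, if_neg (by simp only [beq_iff_eq]; exact fun h => hLx h.symm), List.append_nil]
    · -- new lane
      have hmemset : pvLane x ∉ PySem.Set.ofList (p.map pvLane) := fun h =>
        hmem ((PySem.List.mem_sorted _ _ _ _).mpr h)
      have hlanes : pvLanes (p ++ [x]) =
          PySem.List.insertBy pvBlk (pvLane x) (pvLanes p) := by
        unfold pvLanes
        rw [hofl, PySem.Set.add_of_not_mem hmemset, PySem.List.sorted_eq_foldl_insertBy,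
          PySem.List.sorted_eq_foldl_insertBy, List.foldl_append]
        rfl
      rw [hsnocL, ih, insert_flatMap_notmem _ _ _ hpw hG hmem, hlanes]
      apply List.flatMap_congr
      intro L hL
      have hLmem := (PySem.List.mem_insertBy _ _ _ _).mp hL
      by_cases hLx : L = pvLane x
      · rw [if_pos hLx]
        have hfil : (p ++ [x]).filter (fun r => pvLane r == L) = [x] := by
          rw [List.filter_append]
          have h1 : p.filter (fun r => pvLane r == L) = [] := by
            apply List.filter_eq_nil_iff.mpr
            intro r hr
            simp only [beq_iff_eq]
            intro he
            exact hmemset ((PySem.Set.mem_ofList _ _).mpr (List.mem_map.mpr ⟨r, hr, he ▸ hLx.symm ▸ rfl⟩))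
          rw [h1]
          simp [hLx]
        unfold pvGrp
        rw [hfil]
        rfl
      · rw [if_neg hLx]
        unfold pvGrp
        congr 1
        rw [List.filter_append, List.filter_singleton, Bool.cond_eq_ite]
        rw [if_neg (by simp only [beq_iff_eq]; exact fun h => hLx h.symm)]
        simp

-- ===== A's line list in closed form =====
theorem foldl_pvEmitRow (rs : List (List (String × String))) (acc : List String) :
    rs.foldl (fun lines row => pvEmitRow lines row) acc = acc ++ rs.flatMap pvRowLines := by
  simp only [pvEmitRow_eq]
  exact PySem.List.foldl_append_eq_flatMap _ _ _

def pvLanePattern (rows : List (List (String × String))) (L : String) : List String :=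
  ["## " ++ L] ++ [""] ++ (pvGrp rows L).flatMap pvRowLines ++ [""]

theorem pvGroupedKeys (rows : List (List (String × String))) :
    (rows.foldl (fun d row => d.modify (pvLane row) [] (fun g => g ++ [row]))
      (PySem.Dict.empty : PySem.Dict String (List (List (String × String))))).keys =
      PySem.Set.ofList (rows.map pvLane) := by
  rw [PySem.Dict.keys_foldl_modify_key rows pvLane [] (fun _ row g => g ++ [row])]
  simp [PySem.Dict.empty, PySem.Set.update_nil_left]

theorem pvGroupedGetD (rows : List (List (String × String))) (L : String) :
    (rows.foldl (fun d row => d.modify (pvLane row) [] (fun g => g ++ [row]))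
      (PySem.Dict.empty : PySem.Dict String (List (List (String × String))))).getD L [] =
      rows.filter (fun r => pvLane r == L) := by
  have h : rows.foldl (fun d row => d.modify (pvLane row) [] (fun g => g ++ [row]))
      (PySem.Dict.empty : PySem.Dict String (List (List (String × String)))) =
      (rows.map (fun r => (pvLane r, r))).foldl
        (fun d p => d.modify p.1 [] (fun g => g ++ [p.2])) PySem.Dict.empty := by
    rw [List.foldl_map]
  rw [h, PySem.Dict.getD_foldl_modify_append]
  simp [List.filter_map, Function.comp_def]

theorem pvA_lines (rows : List (List (String × String))) :
    emit_kanban rows =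
      PySem.Str.rstrip (PySem.Str.join "\n"
        (["# Crow's Codex — Kanban Snapshot", ""] ++
          (pvLanes rows).flatMap (pvLanePattern rows))) ++ "\n" := by
  show PySem.Str.rstrip (PySem.Str.join "\n"
      (List.foldl
        (fun lines lane =>
          (List.foldl (fun lines row => pvEmitRow lines row) ((lines ++ ["## " ++ lane]) ++ [""])
            (PySem.List.sorted
              ((rows.foldl (fun d row => d.modify (pvLane row) [] (fun g => g ++ [row]))
                (PySem.Dict.empty : PySem.Dict String (List (List (String × String))))).getD lane [])
              (fun item => pvIdKey item))) ++ [""])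
        ["# Crow's Codex — Kanban Snapshot", ""]
        (PySem.List.sorted
          (rows.foldl (fun d row => d.modify (pvLane row) [] (fun g => g ++ [row]))
            (PySem.Dict.empty : PySem.Dict String (List (List (String × String))))).keys
          (fun l => pvLaneKey l)))) ++ "\n" = _
  rw [pvGroupedKeys]
  simp only [pvGroupedGetD]
  congr 3
  have hlane : ∀ (lane : String) (lines : List String),
      (List.foldl (fun lines row => pvEmitRow lines row) ((lines ++ ["## " ++ lane]) ++ [""])
        (PySem.List.sorted (rows.filter (fun r => pvLane r == lane))
          (fun item => pvIdKey item))) ++ [""] =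
      lines ++ pvLanePattern rows lane := by
    intro lane lines
    rw [foldl_pvEmitRow]
    unfold pvLanePattern pvGrp
    simp
  simp only [hlane]
  exact PySem.List.foldl_append_eq_flatMap _ _ _

-- ===== B's single pass in closed form =====
theorem pvStep_same_lane (rs : List (List (String × String))) (acc : List String) (L : String)
    (h : ∀ r ∈ rs, pvLane r = L) :
    rs.foldl pvStep (acc, some L) = (acc ++ rs.flatMap pvRowLines, some L) := by
  induction rs generalizing acc with
  | nil => simp
  | cons r rs ih =>
    have hr : pvLane r = L := h r (by simp)
    have hstep : pvStep (acc, some L) r = (acc ++ pvRowLines r, some L) := by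
      unfold pvStep
      simp [hr, pvEmitRow_eq]
    rw [List.foldl_cons, hstep, ih _ (fun r hr => h r (by simp [hr]))]
    simp

theorem pvStep_groups (Ls : List String) (G : String → List (List (String × String)))
    (acc : List String) (cur : Option String)
    (hG : ∀ L ∈ Ls, ∀ y ∈ G L, pvLane y = L)
    (hne : ∀ L ∈ Ls, G L ≠ [])
    (hcur : ∀ L ∈ Ls, cur ≠ some L)
    (hnd : Ls.Nodup) :
    (if ((Ls.flatMap G).foldl pvStep (acc, cur)).2 ≠ none then
        ((Ls.flatMap G).foldl pvStep (acc, cur)).1 ++ [""]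
      else ((Ls.flatMap G).foldl pvStep (acc, cur)).1) =
      acc ++ (if cur = none then [] else [""]) ++
        Ls.flatMap (fun L => ["## " ++ L] ++ [""] ++ (G L).flatMap pvRowLines ++ [""]) := by
  induction Ls generalizing acc cur with
  | nil =>
    cases cur <;> simp
  | cons L0 rest ih =>
    obtain ⟨r0, rs, hGr⟩ : ∃ r0 rs, G L0 = r0 :: rs := by
      cases hGL : G L0 with
      | nil => exact absurd hGL (hne L0 (by simp))
      | cons a l => exact ⟨a, l, rfl⟩
    have hr0 : pvLane r0 = L0 := hG L0 (by simp) r0 (by simp [hGr])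
    have hcur0 : cur ≠ some L0 := hcur L0 (by simp)
    have hstep0 : pvStep (acc, cur) r0 =
        ((if cur = none then acc else acc ++ [""]) ++ ["## " ++ L0] ++ [""] ++ pvRowLines r0,
          some L0) := by
      unfold pvStep
      rw [hr0]
      simp only [ne_eq]
      rw [if_pos (by simpa using hcur0)]
      simp [pvEmitRow_eq]
    have hrs : ∀ r ∈ rs, pvLane r = L0 := fun r hr => hG L0 (by simp) r (by simp [hGr, hr])
    rw [List.flatMap_cons, hGr]
    simp only [List.cons_append, List.foldl_cons, hstep0]
    rw [List.foldl_append]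
    rw [pvStep_same_lane rs _ L0 hrs]
    have hL0rest : L0 ∉ rest := (List.nodup_cons.mp hnd).1
    rw [ih _ (some L0) (fun L hL => hG L (by simp [hL])) (fun L hL => hne L (by simp [hL]))
      (fun L hL h => hL0rest ((Option.some_inj.mp h) ▸ hL)) (List.nodup_cons.mp hnd).2]
    cases cur with
    | none => simp [hGr]
    | some c => simp [hGr]

-- lanes/groups side conditions for the final assembly




theorem pvB_lines (rows : List (List (String × String))) :
    emit_kanban_alt rows =
      PySem.Str.rstrip (PySem.Str.join "\n"
        (["# Crow's Codex — Kanban Snapshot", ""] ++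
          (pvLanes rows).flatMap (pvLanePattern rows))) ++ "\n" := by
  show PySem.Str.rstrip (PySem.Str.join "\n"
      (if ((PySem.List.sorted rows (fun row => pvRowKey row)).foldl pvStep
            (["# Crow's Codex — Kanban Snapshot", ""], none)).2 ≠ none then
        ((PySem.List.sorted rows (fun row => pvRowKey row)).foldl pvStep
            (["# Crow's Codex — Kanban Snapshot", ""], none)).1 ++ [""]
      else
        ((PySem.List.sorted rows (fun row => pvRowKey row)).foldl pvStep
            (["# Crow's Codex — Kanban Snapshot", ""], none)).1)) ++ "\n" = _
  rw [pvSorted_decomp rows]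
  rw [pvStep_groups (pvLanes rows) (pvGrp rows) ["# Crow's Codex — Kanban Snapshot", ""] none
    (fun L _ => pvGrp_lane rows L) (pvGrp_ne_nil rows) (by simp) (pvLanes_nodup rows)]
  have hpat : (fun L => ["## " ++ L] ++ [""] ++ (pvGrp rows L).flatMap pvRowLines ++ [""]) =
      pvLanePattern rows := by
    funext L
    rfl
  rw [hpat]
  simp

-- ===== VERDICT (by name: the statement is the Claim_ definition above) =====
theorem emit_kanban_spec : Claim_equal_emit_kanban := by
  unfold Claim_equal_emit_kanban
  intro rows _
  unfold Spec_emit_kanban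
  rw [pvA_lines, pvB_lines]
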